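-- pv_equiv track=rewrite | github.com/nabihestefan/AdventCalendar | Python/2023/day11/day11.py | findBlanks
-- ===== SOURCE A (Python) =====
-- def findBlanks(data):
--     rows = set()
--     cols = set()
--     for i, row in enumerate(data):
--         if True not in row: rows.add(i)
--
--     for col in range(len(data[0])):
--         if True not in [row[col] for row in data]: cols.add(col)
--
--     return rows, cols
-- ===== SOURCE B (Python) =====
-- def findBlanks(data):
--     ncols = len(data[0])
--     rows = set()
--     nonempty = set()
--     for i, row in enumerate(data):
--         if True not in row:
--             rows.add(i)
--         for col in range(ncols):
--             if row[col] == True: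
--                 nonempty.add(col)
--     cols = set(range(ncols)) - nonempty
--     return rows, cols
-- ===== Notes on version B (the rewrite author's own statement) =====
-- stated objective: alternative
-- what changed: Replaces A's per-column scan over all rows (building each column as a list and testing membership) with a single pass over the rows that accumulates the set of non-empty columns, obtaining the blank columns as set(range(ncols)) - nonempty.
import Mathlib
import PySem

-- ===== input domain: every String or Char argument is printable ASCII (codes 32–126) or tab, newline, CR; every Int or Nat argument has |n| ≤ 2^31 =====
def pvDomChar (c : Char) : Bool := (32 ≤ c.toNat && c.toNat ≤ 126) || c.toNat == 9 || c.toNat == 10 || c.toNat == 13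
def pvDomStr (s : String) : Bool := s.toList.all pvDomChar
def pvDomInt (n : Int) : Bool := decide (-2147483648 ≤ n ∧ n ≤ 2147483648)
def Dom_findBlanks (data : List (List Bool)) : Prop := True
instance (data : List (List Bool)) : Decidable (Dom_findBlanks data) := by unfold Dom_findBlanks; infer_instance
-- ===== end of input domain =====

-- B replaces A's per-column scan over all rows by a single pass over the rows that
-- accumulates the set of non-empty columns; blank columns are set(range(ncols)) - nonempty.
-- Same asymptotic cost (alternative decomposition, not claimed faster).

-- ===== PORT A =====
def findBlanks (data : List (List Bool)) : List Int × List Int :=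
  -- rows = set(); for i, row in enumerate(data): if True not in row: rows.add(i)
  let rows := (PySem.List.enumerate data 0).foldl
    (fun (rs : PySem.Set Int) p => if !(p.2.contains true) then PySem.Set.add rs p.1 else rs)
    PySem.Set.empty
  -- for col in range(len(data[0])): if True not in [row[col] for row in data]: cols.add(col)
  -- len(data[0]) raises IndexError on empty data: excluded by Pre_findBlanks
  let cols := (PySem.List.pyRange 0 ((data.headD []).length : Int) 1).foldl
    (fun (cs : PySem.Set Int) col =>
      if !((data.map (fun row => PySem.List.pyGet? row col)).contains (some true))
      then PySem.Set.add cs col else cs)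
    PySem.Set.empty
  (rows, cols)

-- ===== PORT B =====
def findBlanks_alt (data : List (List Bool)) : List Int × List Int :=
  let ncols : Int := ((data.headD []).length : Int)   -- len(data[0]); IndexError on [] excluded by Pre_
  let st := (PySem.List.enumerate data 0).foldl
    (fun (st : PySem.Set Int × PySem.Set Int) p =>
      (if !(p.2.contains true) then PySem.Set.add st.1 p.1 else st.1,
       (PySem.List.pyRange 0 ncols 1).foldl
         (fun (ne : PySem.Set Int) col =>
           if PySem.List.pyGet? p.2 col = some true then PySem.Set.add ne col else ne)
         st.2))
    (PySem.Set.empty, PySem.Set.empty)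
  (st.1, PySem.Set.diff (PySem.Set.ofList (PySem.List.pyRange 0 ncols 1)) st.2)

-- ===== PRECONDITION & SPEC =====
-- Pre_ excludes exactly the inputs where Python A raises IndexError: empty data
-- (len(data[0])) and data with a row shorter than the first row (row[col]).
def Pre_findBlanks (data : List (List Bool)) : Prop :=
  data ≠ [] ∧ ∀ row ∈ data, (data.headD []).length ≤ row.length
instance (data : List (List Bool)) : Decidable (Pre_findBlanks data) := by
  unfold Pre_findBlanks; infer_instance

def pvWitness_findBlanks : List (List Bool) := [[true, false], [false, false]]

def Spec_findBlanks (data : List (List Bool)) (out : List Int × List Int) : Prop := out = findBlanks_alt data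
instance (data : List (List Bool)) (out : List Int × List Int) : Decidable (Spec_findBlanks data out) := by unfold Spec_findBlanks; infer_instance

-- ===== CLAIM (what is proved, stated in full; the proofs are below) =====
def Claim_equal_findBlanks : Prop := ∀ (data : List (List Bool)), Dom_findBlanks data → Pre_findBlanks data → Spec_findBlanks data (findBlanks data)

-- ===== LEMMAS AND PROOFS =====

-- a fold over a pair whose components evolve independently splits into two folds
theorem foldl_prod_split {α β γ : Type} (l : List γ) (f : α → γ → α) (g : β → γ → β)
    (a : α) (b : β) :
    l.foldl (fun st p => (f st.1 p, g st.2 p)) (a, b) = (l.foldl f a, l.foldl g b) := by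
  induction l generalizing a b with
  | nil => rfl
  | cons x xs ih => simp [List.foldl, ih]

-- a fold over enumerate that ignores the index is a fold over the list
theorem foldl_enumerate_snd {α β : Type} (xs : List α) (s : Int) (g : β → α → β) (b : β) :
    (PySem.List.enumerate xs s).foldl (fun acc p => g acc p.2) b = xs.foldl g b := by
  induction xs generalizing s b with
  | nil => rfl
  | cons x l ih => simp [PySem.List.enumerate_cons, List.foldl, ih]

-- membership in the inner accumulation of non-empty columns for one row
theorem mem_inner (row : List Bool) (cols : List Int) (s : PySem.Set Int) (c : Int) :
    c ∈ cols.foldl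
        (fun (ne : PySem.Set Int) col =>
          if PySem.List.pyGet? row col = some true then PySem.Set.add ne col else ne) s
      ↔ c ∈ s ∨ (c ∈ cols ∧ PySem.List.pyGet? row c = some true) := by
  induction cols generalizing s with
  | nil => simp
  | cons x xs ih =>
    simp only [List.foldl]
    split_ifs with hx
    · rw [ih]
      simp only [PySem.Set.mem_add, List.mem_cons]
      constructor
      · rintro ((h | rfl) | h)
        · exact Or.inl h
        · exact Or.inr ⟨Or.inl rfl, hx⟩
        · exact Or.inr ⟨Or.inr h.1, h.2⟩
      · rintro (h | ⟨(rfl | h), hc⟩)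
        · exact Or.inl (Or.inl h)
        · exact Or.inl (Or.inr rfl)
        · exact Or.inr ⟨h, hc⟩
    · rw [ih]
      simp only [List.mem_cons]
      constructor
      · rintro (h | h)
        · exact Or.inl h
        · exact Or.inr ⟨Or.inr h.1, h.2⟩
      · rintro (h | ⟨(rfl | h), hc⟩)
        · exact Or.inl h
        · exact absurd hc hx
        · exact Or.inr ⟨h, hc⟩

-- membership in the accumulated set of non-empty columns over all rows
theorem mem_ne (rowsL : List (List Bool)) (cols : List Int) (s : PySem.Set Int) (c : Int) :
    c ∈ rowsL.foldl
        (fun (ne : PySem.Set Int) row =>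
          cols.foldl
            (fun (ne : PySem.Set Int) col =>
              if PySem.List.pyGet? row col = some true then PySem.Set.add ne col else ne) ne) s
      ↔ c ∈ s ∨ ∃ row ∈ rowsL, c ∈ cols ∧ PySem.List.pyGet? row c = some true := by
  induction rowsL generalizing s with
  | nil => simp
  | cons r rs ih =>
    simp only [List.foldl, ih, mem_inner, List.mem_cons]
    constructor
    · rintro ((h | h) | ⟨row, hrow, h⟩)
      · exact Or.inl h
      · exact Or.inr ⟨r, Or.inl rfl, h⟩
      · exact Or.inr ⟨row, Or.inr hrow, h⟩
    · rintro (h | ⟨row, (rfl | hrow), h⟩)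
      · exact Or.inl (Or.inl h)
      · exact Or.inl (Or.inr h)
      · exact Or.inr ⟨row, hrow, h⟩

-- a guarded Set.add fold over a duplicate-free list disjoint from the accumulator is a filter
theorem foldl_guard_add_eq_filter (P : Int → Bool) (cols : List Int) (s : PySem.Set Int)
    (hnd : cols.Nodup) (hdisj : ∀ x ∈ cols, x ∉ s) :
    cols.foldl (fun (cs : PySem.Set Int) col => if P col then PySem.Set.add cs col else cs) s
      = s ++ cols.filter P := by
  induction cols generalizing s with
  | nil => simp
  | cons x xs ih =>
    simp only [List.foldl, List.filter_cons]
    have hxns : x ∉ s := hdisj x (List.mem_cons_self ..)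
    have hnd' := hnd.of_cons
    have hxnxs : x ∉ xs := (List.nodup_cons.mp hnd).1
    by_cases hP : P x
    · simp only [hP, if_true]
      have hadd : PySem.Set.add s x = s ++ [x] := by
        simp [PySem.Set.add, hxns]
      rw [hadd, ih (s ++ [x]) hnd' (by
        intro y hy
        simp only [List.mem_append, List.mem_singleton]
        rintro (h | rfl)
        · exact hdisj y (List.mem_cons_of_mem _ hy) h
        · exact hxnxs hy)]
      simp
    · simp only [hP, if_false, Bool.false_eq_true]
      exact ih s hnd' (fun y hy => hdisj y (List.mem_cons_of_mem _ hy))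

-- set(xs) = xs when xs has no duplicates
theorem ofList_nodup_eq_self (xs : List Int) (h : xs.Nodup) : PySem.Set.ofList xs = xs := by
  have := foldl_guard_add_eq_filter (fun _ => true) xs PySem.Set.empty h (by simp [PySem.Set.empty])
  simpa [PySem.Set.ofList, PySem.Set.empty] using this

-- ===== VERDICT (by name: the statement is the Claim_ definition above) =====
theorem findBlanks_spec : Claim_equal_findBlanks := by
  intro data _ _
  unfold Spec_findBlanks findBlanks findBlanks_alt
  dsimp only
  rw [foldl_prod_split (PySem.List.enumerate data 0)
        (fun (rs : PySem.Set Int) (p : Int × List Bool) =>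
          if !(p.2.contains true) then PySem.Set.add rs p.1 else rs)
        (fun (ne : PySem.Set Int) (p : Int × List Bool) =>
          (PySem.List.pyRange 0 ((data.headD []).length : Int) 1).foldl
            (fun (ne : PySem.Set Int) col =>
              if PySem.List.pyGet? p.2 col = some true then PySem.Set.add ne col else ne) ne)
        PySem.Set.empty PySem.Set.empty]
  refine Prod.ext rfl ?_
  -- cols side
  simp only
  rw [foldl_enumerate_snd data 0
        (fun (ne : PySem.Set Int) (row : List Bool) =>
          (PySem.List.pyRange 0 ((data.headD []).length : Int) 1).foldl
            (fun (ne : PySem.Set Int) col =>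
              if PySem.List.pyGet? row col = some true then PySem.Set.add ne col else ne) ne)
        PySem.Set.empty]
  set n : Int := ((data.headD []).length : Int) with hn
  set cols := PySem.List.pyRange 0 n 1 with hcols
  have hnd : cols.Nodup := PySem.List.nodup_pyRange_one 0 n
  rw [foldl_guard_add_eq_filter _ cols PySem.Set.empty hnd (by simp [PySem.Set.empty])]
  rw [ofList_nodup_eq_self cols hnd]
  simp only [PySem.Set.diff]
  apply List.filter_congr
  intro c hc
  have hmem : c ∈ (data.foldl
      (fun (ne : PySem.Set Int) row =>
        cols.foldl
          (fun (ne : PySem.Set Int) col =>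
            if PySem.List.pyGet? row col = some true then PySem.Set.add ne col else ne) ne)
      PySem.Set.empty)
      ↔ ∃ row ∈ data, PySem.List.pyGet? row c = some true := by
    rw [mem_ne]
    simp only [PySem.Set.empty, List.not_mem_nil, false_or]
    exact ⟨fun ⟨r, hr, _, h⟩ => ⟨r, hr, h⟩, fun ⟨r, hr, h⟩ => ⟨r, hr, hc, h⟩⟩
  have hmap : (some true ∈ data.map (fun row => PySem.List.pyGet? row c))
      ↔ ∃ row ∈ data, PySem.List.pyGet? row c = some true := by
    simp only [List.mem_map]
  simp only [Bool.not_eq_eq_eq_not, Bool.not_not]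
  rw [Bool.eq_iff_iff, List.contains_iff_mem, PySem.Set.contains_iff]
  rw [hmap, hmem]
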